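-- pv_equiv track=rewrite | github.com/h4shk4t/ART | examples/r2e-gym-rlm/debug_rollout.py | _count_helper_calls
-- ===== SOURCE A (Python) =====
-- HELPER_NAMES = [
--     "ls",
--     "read",
--     "grep",
--     "apply_patch",
--     "run_tests",
--     "bash",
--     "finish",
--     "sub_query",
--     "llm_query",
--     "llm_query_batched",
-- ]
--
-- def _count_helper_calls(code: str) -> dict[str, int]:
--     counts = {name: 0 for name in HELPER_NAMES}
--     for name in HELPER_NAMES:
--         total = 0
--         idx = 0
--         while True:
--             idx = code.find(name, idx)
--             if idx == -1:
--                 break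
--             # Ensure a word boundary before name
--             if idx > 0 and (code[idx - 1].isalnum() or code[idx - 1] == "_"):
--                 idx += len(name)
--                 continue
--             j = idx + len(name)
--             while j < len(code) and code[j].isspace():
--                 j += 1
--             if j < len(code) and code[j] == "(":
--                 total += 1
--             idx += len(name)
--         counts[name] = total
--     return counts
-- ===== SOURCE B (Python) =====
-- HELPER_NAMES = [
--     "ls",
--     "read",
--     "grep",
--     "apply_patch",
--     "run_tests",
--     "bash",
--     "finish",
--     "sub_query",
--     "llm_query",
--     "llm_query_batched",
-- ]
--
-- def _count_helper_calls(code: str) -> dict[str, int]: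
--     # One left-to-right tokenizing pass instead of one find() scan per helper name.
--     helper_set = set(HELPER_NAMES)
--     counts = {name: 0 for name in HELPER_NAMES}
--     n = len(code)
--     i = 0
--     while i < n:
--         c = code[i]
--         if c.isalnum() or c == "_":
--             j = i + 1
--             while j < n and (code[j].isalnum() or code[j] == "_"):
--                 j += 1
--             token = code[i:j]
--             if token in helper_set:
--                 k = j
--                 while k < n and code[k].isspace():
--                     k += 1
--                 if k < n and code[k] == "(":
--                     counts[token] += 1
--             i = j
--         else:
--             i += 1
--     return counts
-- ===== Notes on version B (the rewrite author's own statement) =====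
-- stated objective: alternative
-- what changed: B replaces A's per-helper-name str.find scan-and-jump loops (one pass over the code per name) by a single left-to-right tokenizer pass that extracts each maximal run of word characters and checks it once against the helper-name set.
import Mathlib
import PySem

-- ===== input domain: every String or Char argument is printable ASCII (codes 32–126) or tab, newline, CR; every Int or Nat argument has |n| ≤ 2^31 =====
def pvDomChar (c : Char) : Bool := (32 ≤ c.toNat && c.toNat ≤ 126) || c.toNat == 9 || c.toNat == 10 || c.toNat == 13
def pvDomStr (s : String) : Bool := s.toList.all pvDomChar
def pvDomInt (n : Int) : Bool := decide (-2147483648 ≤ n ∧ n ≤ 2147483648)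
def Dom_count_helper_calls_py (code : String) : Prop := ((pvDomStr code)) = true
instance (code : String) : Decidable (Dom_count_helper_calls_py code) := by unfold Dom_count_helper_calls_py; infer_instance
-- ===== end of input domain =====

-- B replaces A's per-helper-name find()-and-jump scans by ONE left-to-right tokenizer pass
-- over the code (objective: alternative — a genuinely different traversal, same exact result).

-- ===== PORT A =====
-- module constant HELPER_NAMES (shared by both Pythons)
def pvHelperNames : List String :=
  ["ls", "read", "grep", "apply_patch", "run_tests", "bash", "finish",
   "sub_query", "llm_query", "llm_query_batched"]

-- the test 'c.isalnum() or c == "_"' (appears in both Pythons)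
def pvIsWord (c : Char) : Bool := PySem.Chars.isalnum c || c == '_'

-- 'while j < len(code) and code[j].isspace(): j += 1' (appears in both Pythons).
-- fuel is a totality guard only: the wrapper passes code.length + 1, which the loop never exhausts.
def pvSkipSpaceGo (code : List Char) : Nat → Nat → Nat
  | 0, j => j
  | fuel + 1, j =>
    if h : j < code.length then
      if PySem.Chars.isspace code[j] then pvSkipSpaceGo code fuel (j + 1) else j
    else j

def pvSkipSpace (code : List Char) (j : Nat) : Nat := pvSkipSpaceGo code (code.length + 1) j

-- A's 'while True: idx = code.find(name, idx); …' loop for one name.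
-- Totality guard 'code.length < idx ∨ name.length = 0': for idx past the end find returns -1 and
-- the Python loop breaks with the same result; the empty name is never passed by the caller.
def pvFindLoopGo (code name : List Char) : Nat → Nat → Int → Int
  | 0, _, total => total
  | fuel + 1, idx, total =>
    if hg : code.length < idx ∨ name.length = 0 then total
    else
      let r := PySem.Chars.findFrom code name (idx : Int) none
      if hr : r = -1 then total
      else
        let p := r.toNat
        if 0 < p ∧ pvIsWord (code.getD (p - 1) ' ') = true then
          pvFindLoopGo code name fuel (p + name.length) total
        else
          let j := pvSkipSpace code (p + name.length)
          if hj : j < code.length then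
            if code[j] = '(' then pvFindLoopGo code name fuel (p + name.length) (total + 1)
            else pvFindLoopGo code name fuel (p + name.length) total
          else pvFindLoopGo code name fuel (p + name.length) total

def pvFindLoop (code name : List Char) (idx : Nat) (total : Int) : Int :=
  pvFindLoopGo code name (code.length + 1 - idx) idx total

def count_helper_calls_py (code : String) : List (String × Int) :=
  let counts := pvHelperNames.foldl (fun d name => d.insert name (0 : Int)) PySem.Dict.empty
  let counts := pvHelperNames.foldl
    (fun d name => d.insert name (pvFindLoop code.toList name.toList 0 0)) counts
  counts.items

-- ===== PORT B =====
-- 'while j < n and (code[j].isalnum() or code[j] == "_"): j += 1' (fuel: totality guard, as above)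
def pvWordEndGo (code : List Char) : Nat → Nat → Nat
  | 0, j => j
  | fuel + 1, j =>
    if h : j < code.length then
      if pvIsWord code[j] then pvWordEndGo code fuel (j + 1) else j
    else j

def pvWordEnd (code : List Char) (j : Nat) : Nat := pvWordEndGo code (code.length + 1) j

-- B's main 'while i < n' tokenizer loop
def pvScanGo (code : List Char) (helperSet : PySem.Set String) :
    Nat → Nat → PySem.Dict String Int → PySem.Dict String Int
  | 0, _, counts => counts
  | fuel + 1, i, counts =>
    if h : i < code.length then
      if pvIsWord code[i] then
        let j := pvWordEnd code (i + 1)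
        let token := String.ofList (PySem.List.slice code (some (i : Int)) (some (j : Int)))
        let counts' :=
          if helperSet.contains token then
            let k := pvSkipSpace code j
            if hk : k < code.length then
              if code[k] = '(' then counts.modify token 0 (· + 1) else counts
            else counts
          else counts
        pvScanGo code helperSet fuel j counts'
      else pvScanGo code helperSet fuel (i + 1) counts
    else counts

def pvScan (code : List Char) (helperSet : PySem.Set String) (i : Nat)
    (counts : PySem.Dict String Int) : PySem.Dict String Int :=
  pvScanGo code helperSet (code.length + 1 - i) i counts

def count_helper_calls_py_alt (code : String) : List (String × Int) :=
  let helperSet := PySem.Set.ofList pvHelperNames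
  let counts := pvHelperNames.foldl (fun d name => d.insert name (0 : Int)) PySem.Dict.empty
  (pvScan code.toList helperSet 0 counts).items

-- ===== PRECONDITION & SPEC =====
def Spec_count_helper_calls_py (code : String) (out : List (String × Int)) : Prop := out = count_helper_calls_py_alt code
instance (code : String) (out : List (String × Int)) : Decidable (Spec_count_helper_calls_py code out) := by unfold Spec_count_helper_calls_py; infer_instance

-- ===== CLAIM (what is proved, stated in full; the proofs are below) =====
def Claim_equal_count_helper_calls_py : Prop := ∀ (code : String), Dom_count_helper_calls_py code → Spec_count_helper_calls_py code (count_helper_calls_py code)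

-- ===== LEMMAS AND PROOFS =====

-- the occurrences A counts: name occurs at p, preceded by a word boundary, followed
-- (after whitespace) by '('
abbrev pvAfterOK (code : List Char) (j : Nat) : Prop :=
  pvSkipSpace code j < code.length ∧ code.getD (pvSkipSpace code j) ' ' = '('

abbrev pvCond (code name : List Char) (p : Nat) : Prop :=
  name <+: code.drop p ∧ (p = 0 ∨ pvIsWord (code.getD (p - 1) ' ') = false) ∧
    pvAfterOK code (p + name.length)

def pvCnt (code name : List Char) (i : Nat) : Nat :=
  ((Finset.range code.length).filter (fun p => i ≤ p ∧ pvCond code name p)).card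


-- ---- small facts about characters (on the ASCII input domain) ----

theorem pvCharCases : ∀ n : Fin 127,
    (PySem.Chars.isspace (Char.ofNat n.val) = true → pvIsWord (Char.ofNat n.val) = false) := by
  decide

theorem pvSpaceNotWord (c : Char) (hd : pvDomChar c = true)
    (hs : PySem.Chars.isspace c = true) : pvIsWord c = false := by
  have hlt : c.toNat < 127 := by
    simp [pvDomChar] at hd; omega
  have h := pvCharCases ⟨c.toNat, hlt⟩
  rw [show (⟨c.toNat, hlt⟩ : Fin 127).val = c.toNat from rfl, Char.ofNat_toNat] at h
  exact h hs

theorem pvParenNotWord : pvIsWord '(' = false := by decide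

-- ---- facts about the prefix occurrences ----

theorem pvPrefix_getD (code name : List Char) (p : Nat) (hp : name <+: code.drop p)
    (t : Nat) (ht : t < name.length) :
    p + t < code.length ∧ code.getD (p + t) ' ' = name[t] := by
  obtain ⟨rest, hr⟩ := hp
  have hlen : code.length - p = name.length + rest.length := by
    have h := congrArg List.length hr
    simp at h
    omega
  have hple := List.length_drop (l := code) (i := p) ▸ hlen
  have hlt : p + t < code.length := by
    by_cases hpc : p ≤ code.length
    · omega
    · exfalso
      have : code.drop p = [] := List.drop_eq_nil_of_le (by omega)
      rw [this] at hr
      have := congrArg List.length hr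
      simp at this
      omega
  refine ⟨hlt, ?_⟩
  rw [List.getD_eq_getElem code ' ' hlt]
  have h1 : code[p + t] = (code.drop p)[t]'(by simp; omega) := by
    rw [List.getElem_drop]
  rw [h1]
  have h2 : (code.drop p)[t]'(by simp; omega) = (name ++ rest)[t]'(by simp; omega) := by
    congr 1
    exact hr.symm
  rw [h2, List.getElem_append_left ht]

theorem pvCond_bounds (code name : List Char) (p : Nat) (hne : name ≠ [])
    (hc : pvCond code name p) : p < code.length ∧ p + name.length ≤ code.length := by
  have hlen : 0 < name.length := List.length_pos_iff.mpr hne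
  have := pvPrefix_getD code name p hc.1 (name.length - 1) (by omega)
  omega

-- word boundary inside a found occurrence: no countable position strictly inside
theorem pvCond_no_overlap (code name : List Char) (p q : Nat)
    (hw : ∀ c ∈ name, pvIsWord c = true) (hp : name <+: code.drop p)
    (h1 : p < q) (h2 : q < p + name.length) : ¬ pvCond code name q := by
  intro hc
  rcases hc.2.1 with h0 | hb
  · omega
  · have hg := pvPrefix_getD code name p hp (q - 1 - p) (by omega)
    have : pvIsWord (code.getD (p + (q - 1 - p)) ' ') = true := by
      rw [hg.2]; exact hw _ (List.getElem_mem _)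
    have hq1 : p + (q - 1 - p) = q - 1 := by omega
    rw [hq1] at this
    rw [this] at hb
    exact Bool.true_eq_false ▸ hb

-- first char of an occurrence is a word char, so a non-word char position is never counted
theorem pvCond_first_word (code name : List Char) (q : Nat) (hne : name ≠ [])
    (hw : ∀ c ∈ name, pvIsWord c = true) (hc : pvCond code name q) :
    pvIsWord (code.getD q ' ') = true := by
  have hlen : 0 < name.length := List.length_pos_iff.mpr hne
  have hg := pvPrefix_getD code name q hc.1 0 hlen
  rw [Nat.add_zero] at hg
  rw [hg.2]
  exact hw _ (List.getElem_mem _)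

-- ---- counting lemmas ----

theorem pvCnt_zero (code name : List Char) (i : Nat) (h : code.length ≤ i) :
    pvCnt code name i = 0 := by
  unfold pvCnt
  rw [Finset.card_eq_zero, Finset.filter_eq_empty_iff]
  intro p hp
  simp only [Finset.mem_range] at hp
  intro hcc
  omega

theorem pvCnt_skip (code name : List Char) (i j : Nat) (hij : i ≤ j)
    (hnone : ∀ q, i ≤ q → q < j → ¬ pvCond code name q) :
    pvCnt code name i = pvCnt code name j := by
  unfold pvCnt
  congr 1
  apply Finset.filter_congr
  intro p hp
  constructor
  · rintro ⟨h1, h2⟩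
    refine ⟨?_, h2⟩
    by_contra hlt
    exact hnone p h1 (by omega) h2
  · rintro ⟨h1, h2⟩
    exact ⟨by omega, h2⟩

theorem pvCnt_succ (code name : List Char) (i j : Nat) (hc : pvCond code name i)
    (hlt : i < code.length) (hij : i < j)
    (hnone : ∀ q, i < q → q < j → ¬ pvCond code name q) :
    pvCnt code name i = pvCnt code name j + 1 := by
  unfold pvCnt
  have hset : (Finset.range code.length).filter (fun p => i ≤ p ∧ pvCond code name p) =
      insert i ((Finset.range code.length).filter (fun p => j ≤ p ∧ pvCond code name p)) := by
    ext q
    simp only [Finset.mem_insert, Finset.mem_filter, Finset.mem_range]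
    constructor
    · rintro ⟨hq, h1, h2⟩
      by_cases hqi : q = i
      · exact Or.inl hqi
      · right
        refine ⟨hq, ?_, h2⟩
        by_contra hlt2
        exact hnone q (by omega) (by omega) h2
    · rintro (rfl | ⟨hq, h1, h2⟩)
      · exact ⟨hlt, le_refl _, hc⟩
      · exact ⟨hq, by omega, h2⟩
  rw [hset, Finset.card_insert_of_notMem]
  simp only [Finset.mem_filter, Finset.mem_range]
  rintro ⟨-, h1, -⟩
  omega


-- ---- pvSkipSpace / pvWordEnd characterizations ----

theorem pvSkipSpaceGo_ge (code : List Char) (fuel : Nat) : ∀ j, j ≤ pvSkipSpaceGo code fuel j := by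
  induction fuel with
  | zero => intro j; simp [pvSkipSpaceGo]
  | succ fuel ih =>
    intro j
    simp only [pvSkipSpaceGo]
    split
    · split
      · exact le_trans (by omega) (ih (j + 1))
      · exact le_refl j
    · exact le_refl j

theorem pvSkipSpace_ge (code : List Char) (j : Nat) : j ≤ pvSkipSpace code j :=
  pvSkipSpaceGo_ge code (code.length + 1) j

theorem pvAfterOK_first (code : List Char) (j : Nat) (hj : j < code.length)
    (h : pvAfterOK code j) :
    PySem.Chars.isspace (code.getD j ' ') = true ∨ code.getD j ' ' = '(' := by
  by_cases hs : PySem.Chars.isspace code[j] = true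
  · left; rw [List.getD_eq_getElem code ' ' hj]; exact hs
  · right
    have heq : pvSkipSpace code j = j := by
      unfold pvSkipSpace
      simp [pvSkipSpaceGo, hj, hs]
    unfold pvAfterOK at h
    rw [heq] at h
    exact h.2

theorem pvWordEndGo_eq_of (code : List Char) (fuel i m : Nat) (hf : code.length < i + fuel)
    (him : i ≤ m) (hml : m ≤ code.length)
    (hword : ∀ t, i ≤ t → t < m → pvIsWord (code.getD t ' ') = true)
    (hstop : m = code.length ∨ pvIsWord (code.getD m ' ') = false) :
    pvWordEndGo code fuel i = m := by
  cases fuel with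
  | zero => omega
  | succ fuel =>
    simp only [pvWordEndGo]
    by_cases hi : i < code.length
    · simp only [hi, dite_true]
      by_cases hw : pvIsWord code[i] = true
      · have him2 : i < m := by
          rcases Nat.lt_or_ge i m with h | h
          · exact h
          · have : i = m := by omega
            subst this
            rcases hstop with h2 | h2
            · omega
            · rw [List.getD_eq_getElem code ' ' hi] at h2
              rw [hw] at h2; exact absurd h2 (by simp)
        rw [if_pos hw]
        exact pvWordEndGo_eq_of code fuel (i + 1) m (by omega) (by omega) hml
          (fun t h1 h2 => hword t (by omega) h2) hstop
      · rw [if_neg hw]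
        rcases Nat.lt_or_ge i m with h | h
        · have := hword i (le_refl i) h
          rw [List.getD_eq_getElem code ' ' hi] at this
          exact absurd this hw
        · omega
    · simp only [hi, dite_false]
      omega

theorem pvWordEnd_eq_of (code : List Char) (i m : Nat) (him : i ≤ m) (hml : m ≤ code.length)
    (hword : ∀ t, i ≤ t → t < m → pvIsWord (code.getD t ' ') = true)
    (hstop : m = code.length ∨ pvIsWord (code.getD m ' ') = false) :
    pvWordEnd code i = m :=
  pvWordEndGo_eq_of code (code.length + 1) i m (by omega) him hml hword hstop

theorem pvWordEndGo_le (code : List Char) (fuel : Nat) :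
    ∀ j, j ≤ code.length → pvWordEndGo code fuel j ≤ code.length := by
  induction fuel with
  | zero => intro j h; simpa [pvWordEndGo] using h
  | succ fuel ih =>
    intro j h
    simp only [pvWordEndGo]
    split
    · split
      · exact ih (j + 1) (by omega)
      · exact h
    · exact h

theorem pvWordEnd_le (code : List Char) (j : Nat) (h : j ≤ code.length) :
    pvWordEnd code j ≤ code.length :=
  pvWordEndGo_le code (code.length + 1) j h

theorem pvWordEndGo_ge (code : List Char) (fuel : Nat) : ∀ j, j ≤ pvWordEndGo code fuel j := by
  induction fuel with
  | zero => intro j; simp [pvWordEndGo]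
  | succ fuel ih =>
    intro j
    simp only [pvWordEndGo]
    split
    · split
      · exact le_trans (by omega) (ih (j + 1))
      · exact le_refl j
    · exact le_refl j

theorem pvWordEnd_ge (code : List Char) (j : Nat) : j ≤ pvWordEnd code j :=
  pvWordEndGo_ge code (code.length + 1) j

theorem pvWordEndGo_run (code : List Char) (fuel : Nat) :
    ∀ j t, j ≤ t → t < pvWordEndGo code fuel j → pvIsWord (code.getD t ' ') = true := by
  induction fuel with
  | zero =>
    intro j t h1 h2
    simp [pvWordEndGo] at h2
    omega
  | succ fuel ih =>
    intro j t h1 h2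
    simp only [pvWordEndGo] at h2
    by_cases hj : j < code.length
    · simp only [hj, dite_true] at h2
      by_cases hw : pvIsWord code[j] = true
      · rw [if_pos hw] at h2
        rcases Nat.lt_or_ge j t with h | h
        · exact ih (j + 1) t (by omega) h2
        · have : t = j := by omega
          subst this
          rw [List.getD_eq_getElem code ' ' hj]; exact hw
      · rw [if_neg hw] at h2; omega
    · simp only [hj, dite_false] at h2; omega

theorem pvWordEnd_run (code : List Char) (j : Nat) :
    ∀ t, j ≤ t → t < pvWordEnd code j → pvIsWord (code.getD t ' ') = true :=
  pvWordEndGo_run code (code.length + 1) j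

theorem pvWordEndGo_stop (code : List Char) (fuel : Nat) :
    ∀ j, code.length < j + fuel → pvWordEndGo code fuel j < code.length →
      pvIsWord (code.getD (pvWordEndGo code fuel j) ' ') = false := by
  induction fuel with
  | zero => intro j hf h; simp only [pvWordEndGo] at h; omega
  | succ fuel ih =>
    intro j hf h
    rw [pvWordEndGo] at h ⊢
    by_cases hj : j < code.length
    · simp only [hj, dite_true] at h ⊢
      by_cases hw : pvIsWord code[j] = true
      · rw [if_pos hw] at h ⊢
        exact ih (j + 1) (by omega) h
      · rw [if_neg hw] at h ⊢
        rw [List.getD_eq_getElem code ' ' hj]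
        exact Bool.eq_false_iff.mpr hw
    · simp only [hj, dite_false] at h

theorem pvWordEnd_stop (code : List Char) (j : Nat)
    (h : pvWordEnd code j < code.length) :
    pvIsWord (code.getD (pvWordEnd code j) ' ') = false :=
  pvWordEndGo_stop code (code.length + 1) j (by omega) h

theorem pvFindLoopGo_eq (code name : List Char) (hne : name ≠ [])
    (hw : ∀ c ∈ name, pvIsWord c = true) (fuel idx : Nat) (total : Int)
    (hf : code.length + 1 - idx ≤ fuel) :
    pvFindLoopGo code name fuel idx total = total + (pvCnt code name idx : Int) := by
  have hlen : 0 < name.length := List.length_pos_iff.mpr hne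
  cases fuel with
  | zero =>
    rw [pvFindLoopGo, pvCnt_zero code name idx (by omega)]
    simp
  | succ fuel =>
  rw [pvFindLoopGo]
  split
  · rename_i hg
    rcases hg with hg | hg
    · rw [pvCnt_zero code name idx (by omega)]; simp
    · omega
  · rename_i hg
    by_cases hr : PySem.Chars.findFrom code name (idx : Int) none = -1
    · simp only [hr, dite_true]
      have := (PySem.Chars.findFrom_natCast_eq_neg_one_iff code name idx (by omega)).mp hr
      have hzero : pvCnt code name idx = 0 := by
        unfold pvCnt
        rw [Finset.card_eq_zero, Finset.filter_eq_empty_iff]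
        rintro q hq ⟨h1, hc⟩
        apply this
        have hpre : name <+: (code.drop idx).drop (q - idx) := by
          rw [List.drop_drop, show idx + (q - idx) = q by omega]
          exact hc.1
        exact hpre.isInfix.trans (List.drop_suffix _ _).isInfix
      rw [hzero]; simp
    · simp only [hr, dite_false]
      obtain ⟨h1, h2, h3⟩ := PySem.Chars.findFrom_natCast_spec code name idx (by omega) hr
      set p := (PySem.Chars.findFrom code name (idx : Int) none).toNat with hp
      have hip : idx ≤ p := by omega
      have hplen : p + name.length ≤ code.length := by
        have := h2.length_le
        simp only [List.length_drop] at this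
        omega
      have hbefore : ∀ q, idx ≤ q → q < p → ¬ pvCond code name q :=
        fun q hq1 hq2 hc => h3 q hq1 hq2 hc.1
      have hinside : ∀ q, p < q → q < p + name.length → ¬ pvCond code name q :=
        fun q hq1 hq2 => pvCond_no_overlap code name p q hw h2 hq1 hq2
      split
      · rename_i htest
        have hbp : ¬ pvCond code name p := by
          intro hc
          rcases hc.2.1 with h0 | hb
          · omega
          · rw [htest.2] at hb; exact absurd hb (by simp)
        rw [pvFindLoopGo_eq code name hne hw fuel (p + name.length) total (by omega)]
        congr 2
        exact (pvCnt_skip code name idx (p + name.length) (by omega)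
          (fun q hq1 hq2 => by
            rcases Nat.lt_or_ge q p with h | h
            · exact hbefore q hq1 h
            · rcases Nat.eq_or_lt_of_le h with h' | h'
              · rw [← h']; exact hbp
              · exact hinside q h' hq2)).symm
      · rename_i htest
        have hbd : p = 0 ∨ pvIsWord (code.getD (p - 1) ' ') = false := by
          by_cases hp0 : 0 < p
          · right; exact Bool.eq_false_iff.mpr (fun hb => htest ⟨hp0, hb⟩)
          · left; omega
        have hskip : ∀ (h : ¬ pvAfterOK code (p + name.length)),
            pvFindLoopGo code name fuel (p + name.length) total
              = total + (pvCnt code name idx : Int) := by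
          intro hna
          have hbp : ¬ pvCond code name p := fun hc => hna hc.2.2
          rw [pvFindLoopGo_eq code name hne hw fuel (p + name.length) total (by omega)]
          congr 2
          exact (pvCnt_skip code name idx (p + name.length) (by omega)
            (fun q hq1 hq2 => by
              rcases Nat.lt_or_ge q p with h | h
              · exact hbefore q hq1 h
              · rcases Nat.eq_or_lt_of_le h with h' | h'
                · rw [← h']; exact hbp
                · exact hinside q h' hq2)).symm
        split
        · rename_i hj
          split
          · rename_i hpar
            have hafter : pvAfterOK code (p + name.length) :=
              ⟨hj, by rw [List.getD_eq_getElem code ' ' hj]; exact hpar⟩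
            have hc : pvCond code name p := ⟨h2, hbd, hafter⟩
            rw [pvFindLoopGo_eq code name hne hw fuel (p + name.length) (total + 1) (by omega)]
            have hcnt : pvCnt code name idx = pvCnt code name (p + name.length) + 1 := by
              rw [pvCnt_skip code name idx p hip hbefore]
              exact pvCnt_succ code name p (p + name.length) hc (by omega) (by omega) hinside
            rw [hcnt]
            push_cast
            ring
          · rename_i hpar
            exact hskip (fun ha => hpar (by rw [← List.getD_eq_getElem code ' ' hj]; exact ha.2))
        · rename_i hj
          exact hskip (fun ha => hj ha.1)
termination_by fuel

theorem pvFindLoop_eq (code name : List Char) (hne : name ≠ [])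
    (hw : ∀ c ∈ name, pvIsWord c = true) (idx : Nat) (total : Int) :
    pvFindLoop code name idx total = total + (pvCnt code name idx : Int) :=
  pvFindLoopGo_eq code name hne hw (code.length + 1 - idx) idx total (le_refl _)


-- ---- facts about the helper names (literal list) ----

theorem pvNamesFactsB :
    pvHelperNames.all (fun n => !n.toList.isEmpty && n.toList.all pvIsWord) = true := by decide

theorem pvNamesFacts : ∀ name ∈ pvHelperNames,
    name.toList ≠ [] ∧ ∀ c ∈ name.toList, pvIsWord c = true := by
  intro name hn
  have h := List.all_eq_true.mp pvNamesFactsB name hn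
  simp only [Bool.and_eq_true, Bool.not_eq_true', List.isEmpty_eq_false_iff,
    List.all_eq_true] at h
  exact ⟨h.1, h.2⟩

theorem pvNamesNodup : pvHelperNames.Nodup := by decide

-- A counted position inside a word run is exactly "the maximal token equals the name and '(' follows"
theorem pvCond_iff_token (code : List Char) (hdom : ∀ c ∈ code, pvDomChar c = true)
    (name : List Char) (hne : name ≠ []) (hw : ∀ c ∈ name, pvIsWord c = true)
    (i : Nat) (hi : i < code.length)
    (hcln : i = 0 ∨ pvIsWord (code.getD (i - 1) ' ') = false) :
    pvCond code name i ↔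
      (name = (code.drop i).take (pvWordEnd code (i + 1) - i) ∧
        pvAfterOK code (pvWordEnd code (i + 1))) := by
  have hLpos : 0 < name.length := List.length_pos_iff.mpr hne
  constructor
  · intro hc
    have hbnd := pvCond_bounds code name i hne hc
    have hiL : i + name.length < code.length := by
      have h1 := pvSkipSpace_ge code (i + name.length)
      have h2 := hc.2.2.1
      omega
    have hnw : pvIsWord (code.getD (i + name.length) ' ') = false := by
      rcases pvAfterOK_first code (i + name.length) hiL hc.2.2 with hs | hp
      · refine pvSpaceNotWord _ (hdom _ ?_) hs
        rw [List.getD_eq_getElem code ' ' hiL]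
        exact List.getElem_mem _
      · rw [hp]; exact pvParenNotWord
    have hj : pvWordEnd code (i + 1) = i + name.length :=
      pvWordEnd_eq_of code (i + 1) (i + name.length) (by omega) (by omega)
        (fun t h1 h2 => by
          have hg := pvPrefix_getD code name i hc.1 (t - i) (by omega)
          rw [show i + (t - i) = t by omega] at hg
          rw [hg.2]; exact hw _ (List.getElem_mem _))
        (Or.inr hnw)
    refine ⟨?_, by rw [hj]; exact hc.2.2⟩
    rw [hj, show i + name.length - i = name.length by omega]
    exact List.prefix_iff_eq_take.mp hc.1
  · rintro ⟨ht, ha⟩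
    have hij : i + 1 ≤ pvWordEnd code (i + 1) := pvWordEnd_ge code (i + 1)
    have hjl : pvWordEnd code (i + 1) ≤ code.length := pvWordEnd_le code (i + 1) (by omega)
    have hLlen : name.length = pvWordEnd code (i + 1) - i := by
      rw [ht]
      simp only [List.length_take, List.length_drop]
      omega
    refine ⟨?_, hcln, ?_⟩
    · rw [ht]; exact List.take_prefix _ _
    · rw [hLlen, show i + (pvWordEnd code (i + 1) - i) = pvWordEnd code (i + 1) by omega]
      exact ha

theorem pvScanGo_eq (code : List Char) (hdom : ∀ c ∈ code, pvDomChar c = true)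
    (fuel i : Nat) (counts : PySem.Dict String Int)
    (hf : code.length + 1 - i ≤ fuel)
    (hkeys : counts.keys = pvHelperNames)
    (hok : (i = 0 ∨ pvIsWord (code.getD (i - 1) ' ') = false) ∨
      (i < code.length → pvIsWord (code.getD i ' ') = false)) :
    (pvScanGo code (PySem.Set.ofList pvHelperNames) fuel i counts).keys = pvHelperNames ∧
    ∀ name ∈ pvHelperNames,
      (pvScanGo code (PySem.Set.ofList pvHelperNames) fuel i counts).getD name 0 =
        counts.getD name 0 + (pvCnt code name.toList i : Int) := by
  cases fuel with
  | zero =>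
    rw [pvScanGo]
    refine ⟨hkeys, fun name hn => ?_⟩
    rw [pvCnt_zero code name.toList i (by omega)]
    simp
  | succ fuel =>
  rw [pvScanGo]
  by_cases h : i < code.length
  · by_cases hwi : pvIsWord code[i] = true
    · simp only [h, dite_true, hwi, if_true]
      have hwiD : pvIsWord (code.getD i ' ') = true := by
        rw [List.getD_eq_getElem code ' ' h]; exact hwi
      have hcln : i = 0 ∨ pvIsWord (code.getD (i - 1) ' ') = false := by
        rcases hok with hc | hc
        · exact hc
        · rw [hc h] at hwiD; exact absurd hwiD (by simp)
      set j := pvWordEnd code (i + 1) with hjdef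
      have hij : i + 1 ≤ j := pvWordEnd_ge code (i + 1)
      have hjl : j ≤ code.length := pvWordEnd_le code (i + 1) (by omega)
      have hok' : (j = 0 ∨ pvIsWord (code.getD (j - 1) ' ') = false) ∨
          (j < code.length → pvIsWord (code.getD j ' ') = false) :=
        Or.inr (fun hjlen => pvWordEnd_stop code (i + 1) hjlen)
      -- the token string
      have htokL : (String.ofList (PySem.List.slice code (some (i : Int)) (some (j : Int)))).toList
          = (code.drop i).take (j - i) := by
        rw [String.toList_ofList, PySem.List.slice_natCast]
      set token := String.ofList (PySem.List.slice code (some (i : Int)) (some (j : Int)))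
        with htokdef
      have htokeq : ∀ name : String, name = token ↔ name.toList = (code.drop i).take (j - i) := by
        intro name
        rw [← String.toList_inj, htokL]
      -- no countable position strictly inside the run
      have hmid : ∀ name ∈ pvHelperNames, ∀ q, i < q → q < j → ¬ pvCond code name.toList q := by
        intro name hn q h1 h2 hc
        rcases hc.2.1 with h0 | hb
        · omega
        · have hword : pvIsWord (code.getD (q - 1) ' ') = true := by
            rcases Nat.eq_or_lt_of_le (show i ≤ q - 1 by omega) with h' | h'
            · rw [← h']; exact hwiD
            · exact pvWordEnd_run code (i + 1) (q - 1) (by omega) (by omega)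
          rw [hword] at hb; exact absurd hb (by simp)
      -- per-name count step across the run
      have hcnt : ∀ name ∈ pvHelperNames,
          pvCnt code name.toList i =
            pvCnt code name.toList j +
              (if name = token ∧ pvAfterOK code j then 1 else 0) := by
        intro name hn
        obtain ⟨hne, hw⟩ := pvNamesFacts name hn
        have hiff := pvCond_iff_token code hdom name.toList hne hw i h hcln
        by_cases hcase : name = token ∧ pvAfterOK code j
        · rw [if_pos hcase]
          have hc : pvCond code name.toList i :=
            hiff.mpr ⟨(htokeq name).mp hcase.1, hcase.2⟩
          exact pvCnt_succ code name.toList i j hc h (by omega) (hmid name hn)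
        · rw [if_neg hcase]
          have hnc : ¬ pvCond code name.toList i := by
            intro hc
            obtain ⟨h1, h2⟩ := hiff.mp hc
            exact hcase ⟨(htokeq name).mpr h1, h2⟩
          refine pvCnt_skip code name.toList i j (by omega) (fun q hq1 hq2 => ?_)
          rcases Nat.eq_or_lt_of_le hq1 with h' | h'
          · rw [← h']; exact hnc
          · exact hmid name hn q h' hq2
      -- the updated dictionary
      have hcontains : ((PySem.Set.ofList pvHelperNames).contains token = true) ↔
          token ∈ pvHelperNames := by
        rw [PySem.Set.contains_iff]
        exact PySem.Set.mem_ofList (y := token) (xs := pvHelperNames)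
      -- case on whether the token is counted
      by_cases hT : token ∈ pvHelperNames
      · have hcb : (PySem.Set.ofList pvHelperNames).contains token = true := hcontains.mpr hT
        by_cases hAok : pvAfterOK code j
        · have hcounts' :
              (if (PySem.Set.ofList pvHelperNames).contains token then
                if hk : pvSkipSpace code j < code.length then
                  if code[pvSkipSpace code j] = '(' then counts.modify token 0 (· + 1) else counts
                else counts
              else counts) = counts.modify token 0 (· + 1) := by
            rw [if_pos hcb, dif_pos hAok.1, if_pos (by
              rw [← List.getD_eq_getElem code ' ' hAok.1]; exact hAok.2)]
          rw [hcounts']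
          have hcont : counts.contains token = true := by
            rw [PySem.Dict.contains_iff_mem_keys, hkeys]; exact hT
          have hkeys' : (counts.modify token 0 (· + 1)).keys = pvHelperNames := by
            rw [PySem.Dict.keys_modify, PySem.Dict.keys_insert_of_contains _ _ hcont, hkeys]
          obtain ⟨IH1, IH2⟩ := pvScanGo_eq code hdom fuel j (counts.modify token 0 (· + 1))
            (by omega) hkeys' hok'
          refine ⟨IH1, fun name hn => ?_⟩
          rw [IH2 name hn, PySem.Dict.getD_modify counts token name 0 (fun x => x + 1),
            hcnt name hn]
          by_cases hnt : name = token
          · rw [if_pos hnt, if_pos ⟨hnt, hAok⟩, hnt]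
            push_cast
            ring
          · rw [if_neg hnt, if_neg (fun (hx : name = token ∧ pvAfterOK code j) => hnt hx.1)]
            push_cast
            ring
        · have hcounts' :
              (if (PySem.Set.ofList pvHelperNames).contains token then
                if hk : pvSkipSpace code j < code.length then
                  if code[pvSkipSpace code j] = '(' then counts.modify token 0 (· + 1) else counts
                else counts
              else counts) = counts := by
            rw [if_pos hcb]
            by_cases hk : pvSkipSpace code j < code.length
            · rw [dif_pos hk, if_neg (fun hp => hAok ⟨hk, by
                rw [List.getD_eq_getElem code ' ' hk]; exact hp⟩)]
            · rw [dif_neg hk]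
          rw [hcounts']
          obtain ⟨IH1, IH2⟩ := pvScanGo_eq code hdom fuel j counts (by omega) hkeys hok'
          refine ⟨IH1, fun name hn => ?_⟩
          rw [IH2 name hn, hcnt name hn,
            if_neg (fun (hx : name = token ∧ pvAfterOK code j) => hAok hx.2)]
          push_cast
          ring
      · have hcb : (PySem.Set.ofList pvHelperNames).contains token = false := by
          rw [← Bool.not_eq_true]
          exact fun hx => hT (hcontains.mp hx)
        rw [if_neg (by rw [hcb]; simp)]
        obtain ⟨IH1, IH2⟩ := pvScanGo_eq code hdom fuel j counts (by omega) hkeys hok'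
        refine ⟨IH1, fun name hn => ?_⟩
        rw [IH2 name hn, hcnt name hn,
          if_neg (fun (hx : name = token ∧ pvAfterOK code j) => hT (hx.1 ▸ hn))]
        push_cast
        ring
    · have hwif : pvIsWord code[i] = false := Bool.eq_false_iff.mpr hwi
      simp only [h, dite_true, hwif, Bool.false_eq_true, if_false]
      have hok' : (i + 1 = 0 ∨ pvIsWord (code.getD (i + 1 - 1) ' ') = false) ∨
          (i + 1 < code.length → pvIsWord (code.getD (i + 1) ' ') = false) := by
        left; right
        rw [show i + 1 - 1 = i by omega, List.getD_eq_getElem code ' ' h]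
        exact Bool.eq_false_iff.mpr hwi
      obtain ⟨IH1, IH2⟩ := pvScanGo_eq code hdom fuel (i + 1) counts (by omega) hkeys hok'
      refine ⟨IH1, fun name hn => ?_⟩
      rw [IH2 name hn]
      obtain ⟨hne, hw⟩ := pvNamesFacts name hn
      have hstep : pvCnt code name.toList i = pvCnt code name.toList (i + 1) := by
        refine pvCnt_skip code name.toList i (i + 1) (by omega) (fun q hq1 hq2 => ?_)
        have hqi : q = i := by omega
        subst hqi
        intro hc
        have := pvCond_first_word code name.toList q hne hw hc
        rw [List.getD_eq_getElem code ' ' h] at this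
        rw [this] at hwi
        exact hwi rfl
      rw [hstep]
  · rw [dif_neg h]
    refine ⟨hkeys, fun name hn => ?_⟩
    rw [pvCnt_zero code name.toList i (by omega)]
    simp
termination_by fuel

theorem pvScan_eq (code : List Char) (hdom : ∀ c ∈ code, pvDomChar c = true)
    (i : Nat) (counts : PySem.Dict String Int) (hkeys : counts.keys = pvHelperNames)
    (hok : (i = 0 ∨ pvIsWord (code.getD (i - 1) ' ') = false) ∨
      (i < code.length → pvIsWord (code.getD i ' ') = false)) :
    (pvScan code (PySem.Set.ofList pvHelperNames) i counts).keys = pvHelperNames ∧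
    ∀ name ∈ pvHelperNames,
      (pvScan code (PySem.Set.ofList pvHelperNames) i counts).getD name 0 =
        counts.getD name 0 + (pvCnt code name.toList i : Int) :=
  pvScanGo_eq code hdom (code.length + 1 - i) i counts (le_refl _) hkeys hok

-- ---- assembling the two dictionaries ----

theorem pvGetD_foldl_insert_fn (l : List String) (f : String → Int)
    (d : PySem.Dict String Int) (key : String) :
    (l.foldl (fun d k => d.insert k (f k)) d).getD key 0 =
      if key ∈ l then f key else d.getD key 0 := by
  induction l generalizing d with
  | nil => simp
  | cons a t ih =>
    rw [List.foldl_cons, ih]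
    by_cases hkt : key ∈ t
    · rw [if_pos hkt, if_pos (by simp [hkt])]
    · rw [if_neg hkt]
      by_cases hka : key = a
      · subst hka
        rw [if_pos (by simp), PySem.Dict.getD_insert, if_pos rfl]
      · rw [if_neg (by simp [hka, hkt]), PySem.Dict.getD_insert, if_neg hka]

theorem pvUpdate_self : PySem.Set.update pvHelperNames pvHelperNames = pvHelperNames := by
  rw [PySem.Set.update_eq_append_filter]
  have hnil : (PySem.Set.ofList pvHelperNames).filter
      (fun y => !PySem.Set.contains pvHelperNames y) = [] := by
    rw [List.filter_eq_nil_iff]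
    intro y hy
    have hmem : y ∈ pvHelperNames :=
      (PySem.Set.mem_ofList (y := y) (xs := pvHelperNames)).mp hy
    simpa using hmem
  rw [hnil, List.append_nil]

theorem pvZerosKeys :
    (pvHelperNames.foldl (fun d name => d.insert name (0 : Int)) PySem.Dict.empty).keys
      = pvHelperNames := by
  rw [PySem.Dict.keys_foldl_insert pvHelperNames (fun _ _ => (0 : Int)) PySem.Dict.empty]
  rw [PySem.Dict.keys_empty, PySem.Set.update_nil_left,
    PySem.Set.ofList_eq_self_of_nodup _ pvNamesNodup]

theorem pvZerosGetD (name : String) :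
    (pvHelperNames.foldl (fun d name => d.insert name (0 : Int)) PySem.Dict.empty).getD name 0
      = 0 := by
  rw [pvGetD_foldl_insert_fn pvHelperNames (fun _ => (0 : Int)) PySem.Dict.empty name]
  split <;> simp [PySem.Dict.getD_empty]

-- ===== VERDICT (by name: the statement is the Claim_ definition above) =====
theorem count_helper_calls_py_spec : Claim_equal_count_helper_calls_py := by
  intro code hdc
  unfold Spec_count_helper_calls_py
  have hdom : ∀ c ∈ code.toList, pvDomChar c = true := by
    unfold Dom_count_helper_calls_py pvDomStr at hdc
    exact List.all_eq_true.mp hdc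
  unfold count_helper_calls_py count_helper_calls_py_alt
  simp only []
  -- the A-side dictionary
  set zeros := pvHelperNames.foldl (fun d name => d.insert name (0 : Int)) PySem.Dict.empty
    with hzeros
  set dA := pvHelperNames.foldl
    (fun d name => d.insert name (pvFindLoop code.toList name.toList 0 0)) zeros with hdA
  have hKA : dA.keys = pvHelperNames := by
    rw [hdA, PySem.Dict.keys_foldl_insert pvHelperNames
      (fun _ name => pvFindLoop code.toList name.toList 0 0) zeros, pvZerosKeys, pvUpdate_self]
  -- the B-side dictionary
  obtain ⟨hKB, hVB⟩ := pvScan_eq code.toList hdom 0 zeros pvZerosKeys (Or.inl (Or.inl rfl))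
  -- both item lists are maps over the same key list
  rw [PySem.Dict.items_eq_map_keys dA (by rw [hKA]; exact pvNamesNodup) 0, hKA]
  rw [PySem.Dict.items_eq_map_keys _ (by rw [hKB]; exact pvNamesNodup) 0, hKB]
  apply List.map_congr_left
  intro name hn
  obtain ⟨hne, hw⟩ := pvNamesFacts name hn
  have hAv : dA.getD name 0 = pvFindLoop code.toList name.toList 0 0 := by
    rw [hdA, pvGetD_foldl_insert_fn pvHelperNames
      (fun name => pvFindLoop code.toList name.toList 0 0) zeros name, if_pos hn]
  rw [hAv, hVB name hn, pvZerosGetD name,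
    pvFindLoop_eq code.toList name.toList hne hw 0 0, zero_add]
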